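-- pv_equiv track=rewrite | github.com/jaredap1995/LeetCode | Python/Medium/graphs/unreachablePairsofNodes.py | calcUnreachableNodes
-- ===== SOURCE A (Python) =====
-- import collections
--
-- def calcUnreachableNodes(n, edges):
--     graph = collections.defaultdict(list)
--     for n1,n2 in edges:
--         graph[n1].append(n2)
--         graph[n2].append(n1)
--
--     visited = [0]*n
--     result = 0
--     queue = []
--
--     for i in range(n):
--         if visited[i]==0:
--             queue.append(i)
--             visited[i]=1
--             curCount = 1
--
--             while queue:
--                 cur = queue.pop(0)
--                 for neighbor in graph[cur]:
--                     if visited[neighbor]==0: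
--                         visited[neighbor]=1
--                         curCount +=1
--                         queue.append(neighbor)
--             result += curCount * (n-curCount)
--
--     return result //2
-- ===== SOURCE B (Python) =====
-- def calcUnreachableNodes(n, edges):
--     # Minimum-label propagation instead of BFS: every node's label converges to the
--     # least node index of its connected component, while `size` tracks how many nodes
--     # currently carry each label.  Edges incident to nodes outside range(n) are ignored.
--     label = list(range(n))
--     size = [1] * n
--     changed = True
--     while changed:
--         changed = False
--         for a, b in edges:
--             if 0 <= a < n and 0 <= b < n:
--                 la = label[a]
--                 lb = label[b]
--                 if la < lb:
--                     label[b] = la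
--                     size[lb] -= 1
--                     size[la] += 1
--                     changed = True
--                 elif lb < la:
--                     label[a] = lb
--                     size[la] -= 1
--                     size[lb] += 1
--                     changed = True
--     result = 0
--     for i, (lab, sz) in zip(range(n), zip(label, size)):
--         if lab == i:
--             result += sz * (n - sz)
--     return result // 2
-- ===== Notes on version B (the rewrite author's own statement) =====
-- stated objective: alternative
-- what changed: Replaces the adjacency-dict + BFS queue flood fill with minimum-label propagation over the raw edge list (every node's label converges to the least node index of its connected component while a size array tracks label multiplicities), then one pass over the representatives sums size*(n-size); no adjacency structure or queue is built, and edges incident to nodes outside range(n) are ignored.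
-- outside the precondition, e.g. on calcUnreachableNodes(3, [(-1, 0)]): A returns 2, B returns 3; on calcUnreachableNodes(2, [(0, 5)]): A raises IndexError, B returns 1
import Mathlib
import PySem

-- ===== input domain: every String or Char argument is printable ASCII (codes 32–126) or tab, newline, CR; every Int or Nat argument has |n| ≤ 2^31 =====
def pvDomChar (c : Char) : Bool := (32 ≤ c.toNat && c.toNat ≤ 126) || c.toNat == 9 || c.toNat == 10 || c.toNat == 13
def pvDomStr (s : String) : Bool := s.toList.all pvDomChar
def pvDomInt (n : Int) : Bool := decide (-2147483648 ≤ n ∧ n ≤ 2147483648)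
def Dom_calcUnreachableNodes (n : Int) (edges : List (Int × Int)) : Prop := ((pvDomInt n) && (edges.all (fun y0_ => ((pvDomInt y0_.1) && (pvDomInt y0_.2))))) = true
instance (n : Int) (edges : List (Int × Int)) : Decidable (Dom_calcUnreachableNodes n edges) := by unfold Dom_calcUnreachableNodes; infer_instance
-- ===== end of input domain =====

-- B replaces A's adjacency-list + BFS flood fill by minimum-label propagation over the raw
-- edge list (labels converge to each component's least node index while a size array tracks
-- label multiplicities); objective: alternative (no queue and no adjacency structure is built).

-- ===== PORT A =====
-- the inner `while queue:` loop of A; the fuel argument only makes the recursion total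
-- (2*n+1 is proved sufficient below: each iteration shrinks 2*#unvisited + #queue)
def pvBfs (graph : PySem.Dict Int (List Int)) (fuel : Nat)
    (visited : List Int) (queue : List Int) (count : Int) : List Int × Int :=
  match fuel, queue with
  | _, [] => (visited, count)
  | 0, _ :: _ => (visited, count)
  | f + 1, cur :: rest =>
    let st := (graph.getD cur []).foldl
      (fun (s : List Int × List Int × Int) neighbor =>
        if PySem.List.pyGetD s.1 neighbor 0 == 0 then
          (PySem.List.pySetD s.1 neighbor 1, s.2.1 ++ [neighbor], s.2.2 + 1)
        else s)
      (visited, rest, count)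
    pvBfs graph f st.1 st.2.1 st.2.2

def calcUnreachableNodes (n : Int) (edges : List (Int × Int)) : Int :=
  let graph := edges.foldl
    (fun (g : PySem.Dict Int (List Int)) e =>
      (g.modify e.1 [] (· ++ [e.2])).modify e.2 [] (· ++ [e.1]))
    PySem.Dict.empty
  let st := (PySem.List.pyRange 0 n 1).foldl
    (fun (s : List Int × Int) i =>
      if PySem.List.pyGetD s.1 i 0 == 0 then
        let visited := PySem.List.pySetD s.1 i 1
        let r := pvBfs graph (2 * n.toNat + 1) visited [i] 1
        (r.1, s.2 + r.2 * (n - r.2))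
      else s)
    (List.replicate n.toNat 0, 0)
  PySem.Int.floordiv st.2 2

-- ===== PORT B =====
-- one `for a, b in edges:` pass of B's propagation loop (state: label, size, changed)
def pvPass (n : Int) (edges : List (Int × Int)) (st : List Int × List Int × Bool) :
    List Int × List Int × Bool :=
  edges.foldl
    (fun (s : List Int × List Int × Bool) e =>
      if 0 ≤ e.1 ∧ e.1 < n ∧ 0 ≤ e.2 ∧ e.2 < n then
        let la := PySem.List.pyGetD s.1 e.1 0
        let lb := PySem.List.pyGetD s.1 e.2 0
        if la < lb then
          (PySem.List.pySetD s.1 e.2 la,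
           PySem.List.pySetD (PySem.List.pySetD s.2.1 lb (PySem.List.pyGetD s.2.1 lb 0 - 1)) la
             (PySem.List.pyGetD (PySem.List.pySetD s.2.1 lb (PySem.List.pyGetD s.2.1 lb 0 - 1)) la 0 + 1),
           true)
        else if lb < la then
          (PySem.List.pySetD s.1 e.1 lb,
           PySem.List.pySetD (PySem.List.pySetD s.2.1 la (PySem.List.pyGetD s.2.1 la 0 - 1)) lb
             (PySem.List.pyGetD (PySem.List.pySetD s.2.1 la (PySem.List.pyGetD s.2.1 la 0 - 1)) lb 0 + 1),
           true)
        else s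
      else s)
    st

-- the `while changed:` loop of B; fuel only makes it total (n*n+1 is proved sufficient
-- below: every changed pass strictly decreases the nonnegative label sum)
def pvProp (n : Int) (edges : List (Int × Int)) (fuel : Nat) (label size : List Int) :
    List Int × List Int :=
  match fuel with
  | 0 => (label, size)
  | f + 1 =>
    let st := pvPass n edges (label, size, false)
    if st.2.2 then pvProp n edges f st.1 st.2.1 else (st.1, st.2.1)

def calcUnreachableNodes_alt (n : Int) (edges : List (Int × Int)) : Int :=
  let t := pvProp n edges (n.toNat * n.toNat + 1) (PySem.List.pyRange 0 n 1) (List.replicate n.toNat 1)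
  let result := ((PySem.List.pyRange 0 n 1).zip (t.1.zip t.2)).foldl
    (fun r p => if p.2.1 == p.1 then r + p.2.2 * (n - p.2.2) else r) 0
  PySem.Int.floordiv result 2

-- ===== PRECONDITION & SPEC =====
-- For n > 0, Pre_ excludes edges with an endpoint outside range(n): on those A either raises
-- IndexError (when the BFS reaches the out-of-range node) or returns a value mixing dict keys
-- with wrapped list indices, while B ignores such edges.
def Pre_calcUnreachableNodes (n : Int) (edges : List (Int × Int)) : Prop :=
  n ≤ 0 ∨ ∀ e ∈ edges, (0 ≤ e.1 ∧ e.1 < n) ∧ (0 ≤ e.2 ∧ e.2 < n)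
instance (n : Int) (edges : List (Int × Int)) : Decidable (Pre_calcUnreachableNodes n edges) := by
  unfold Pre_calcUnreachableNodes; infer_instance

def pvWitness_calcUnreachableNodes : Int × (List (Int × Int)) := (5, [(0, 1), (1, 2)])

def Spec_calcUnreachableNodes (n : Int) (edges : List (Int × Int)) (out : Int) : Prop :=
  out = calcUnreachableNodes_alt n edges
instance (n : Int) (edges : List (Int × Int)) (out : Int) : Decidable (Spec_calcUnreachableNodes n edges out) := by
  unfold Spec_calcUnreachableNodes; infer_instance

-- ===== CLAIM (what is proved, stated in full; the proofs are below) =====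
def Claim_equal_calcUnreachableNodes : Prop := ∀ (n : Int) (edges : List (Int × Int)), Dom_calcUnreachableNodes n edges → Pre_calcUnreachableNodes n edges → Spec_calcUnreachableNodes n edges (calcUnreachableNodes n edges)

-- ===== LEMMAS AND PROOFS =====

-- the symmetric adjacency relation of the edge list, and reachability (connectivity)
def pvAdj (edges : List (Int × Int)) (a b : Int) : Prop := (a, b) ∈ edges ∨ (b, a) ∈ edges

def pvR (edges : List (Int × Int)) : Int → Int → Prop := Relation.ReflTransGen (pvAdj edges)

lemma pvAdj_symm {edges : List (Int × Int)} {a b : Int} (h : pvAdj edges a b) : pvAdj edges b a := h.symm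

lemma pvR_symm {edges : List (Int × Int)} {a b : Int} (h : pvR edges a b) : pvR edges b a := by
  induction h with
  | refl => exact Relation.ReflTransGen.refl
  | tail _ hadj ih => exact Relation.ReflTransGen.trans (Relation.ReflTransGen.single (pvAdj_symm hadj)) ih

lemma pvAdj_range {n : Int} {edges : List (Int × Int)} (hpre : ∀ e ∈ edges, (0 ≤ e.1 ∧ e.1 < n) ∧ (0 ≤ e.2 ∧ e.2 < n))
    {a b : Int} (h : pvAdj edges a b) : (0 ≤ a ∧ a < n) ∧ (0 ≤ b ∧ b < n) := by
  rcases h with h | h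
  · exact hpre (a, b) h
  · exact ⟨(hpre (b, a) h).2, (hpre (b, a) h).1⟩

lemma pvR_range {n : Int} {edges : List (Int × Int)} (hpre : ∀ e ∈ edges, (0 ≤ e.1 ∧ e.1 < n) ∧ (0 ≤ e.2 ∧ e.2 < n))
    {a b : Int} (h : pvR edges a b) (ha : 0 ≤ a ∧ a < n) : 0 ≤ b ∧ b < n := by
  induction h with
  | refl => exact ha
  | tail _ hadj _ => exact (pvAdj_range hpre hadj).2

-- list whose k-th entry is f k, for lists characterised pointwise
lemma pv_eq_map_range (n : Int) (v : List Int) (f : Int → Int)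
    (hlen : v.length = n.toNat)
    (h : ∀ k : Int, 0 ≤ k → k < n → PySem.List.pyGetD v k 0 = f k) :
    v = (PySem.List.pyRange 0 n 1).map f := by
  apply List.ext_getElem
  · simp [hlen, PySem.List.length_pyRange_one]
  · intro i h1 h2
    have hi : (i : Int) < n := by
      simp only [List.length_map, PySem.List.length_pyRange_one] at h2; omega
    have h0 : PySem.List.pyGetD v (i : Int) 0 = v[((i : Int)).toNat] :=
      PySem.List.pyGetD_eq_getElem v 0 (by positivity) (by exact_mod_cast h1)
    have h3 := h (i : Int) (by positivity) hi
    rw [h0] at h3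
    simp only [Int.toNat_natCast] at h3
    have h4 : i < (PySem.List.pyRange 0 n 1).length := by
      simpa using h2
    rw [List.getElem_map, PySem.List.getElem_pyRange_one 0 n i h4, zero_add, h3]

lemma pv_get_range {n k : Int} (h0 : 0 ≤ k) (h1 : k < n) :
    PySem.List.pyGetD (PySem.List.pyRange 0 n 1) k 0 = k := by
  have hlen : ((PySem.List.pyRange 0 n 1).length : Int) = n - 0 := by
    rw [PySem.List.length_pyRange_one]; omega
  rw [PySem.List.pyGetD_eq_getElem _ 0 h0 (by omega),
    PySem.List.getElem_pyRange_one 0 n k.toNat (by omega), zero_add, Int.toNat_of_nonneg h0]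

lemma pv_get_set (v : List Int) (j k x : Int) (hj0 : 0 ≤ j) (hj1 : (j : Int) < v.length) (hk : 0 ≤ k) :
    PySem.List.pyGetD (PySem.List.pySetD v j x) k 0 = if k = j then x else PySem.List.pyGetD v k 0 := by
  rw [PySem.List.pySetD_of_nonneg v x hj0]
  rcases lt_or_ge k (v.length : Int) with hk1 | hk1
  · rw [PySem.List.pyGetD_eq_getElem _ 0 hk (by simpa using hk1),
      PySem.List.pyGetD_eq_getElem _ 0 hk (by simpa using hk1)]
    rw [List.getElem_set]
    have : j.toNat = k.toNat ↔ k = j := by omega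
    split_ifs with h1 h2 h2 <;> first | rfl | (exfalso; omega)
  · have hout : ∀ (w : List Int), w.length = v.length → PySem.List.pyGetD w k 0 = 0 := by
      intro w hw
      rw [PySem.List.pyGetD_of_nonneg w 0 hk, List.getD_eq_getElem?_getD,
        List.getElem?_eq_none (by omega)]
      rfl
    rw [hout _ (List.length_set ..), hout v rfl, if_neg (by omega)]

lemma pv_get_map_ind (n : Int) (p : Int → Prop) [DecidablePred p] (k : Int) (hk : 0 ≤ k) :
    PySem.List.pyGetD ((PySem.List.pyRange 0 n 1).map (fun j => if p j then (1 : Int) else 0)) k 0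
      = if k < n ∧ p k then 1 else 0 := by
  rcases lt_or_ge k n with h | h
  · rw [PySem.List.pyGetD_map_pyRange_of_nonneg _ n k 0 hk h]
    by_cases hp : p k <;> simp [hp, h]
  · have hlen : ((PySem.List.pyRange 0 n 1).map
        (fun j => if p j then (1 : Int) else 0)).length = (n - 0).toNat := by
      simp [PySem.List.length_pyRange_one]
    rw [PySem.List.pyGetD_of_nonneg _ 0 hk, List.getD_eq_getElem?_getD,
      List.getElem?_eq_none (by omega), if_neg (by omega)]
    rfl

lemma pv_count0_map_if (l : List Int) (p : Int → Prop) [DecidablePred p] :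
    (l.map (fun k => if p k then (1 : Int) else 0)).count 0 = l.countP (fun k => decide ¬ p k) := by
  induction l with
  | nil => rfl
  | cons x xs ih =>
    rw [List.map_cons, List.count_cons, List.countP_cons, ih]
    by_cases hp : p x <;> simp [hp]

lemma pv_countP_split (l : List Int) (f : Int → Int) (m : Int) :
    l.countP (fun k => decide ¬ (f k < m)) =
      l.countP (fun k => decide ¬ (f k < m + 1)) + l.countP (fun k => decide (f k = m)) := by
  induction l with
  | nil => rfl
  | cons x xs ih =>
    simp only [List.countP_cons, ih]
    by_cases h1 : f x < m + 1 <;> by_cases h2 : f x = m <;> by_cases h3 : f x < m <;>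
      simp [h1, h2, h3] <;> omega

-- ---------- B side: the propagation loop computes the least node index of each component ----------

lemma pv_get_mem (v : List Int) (k : Int) (h0 : 0 ≤ k) (h1 : k < (v.length : Int)) :
    PySem.List.pyGetD v k 0 ∈ v := by
  rw [PySem.List.pyGetD_eq_getElem v 0 h0 h1]
  exact List.getElem_mem _

-- invariant of the label and size lists
def pvLInv (n : Int) (edges : List (Int × Int)) (l s : List Int) : Prop :=
  l.length = n.toNat ∧ s.length = n.toNat ∧ (∀ x ∈ l, 0 ≤ x) ∧
    (∀ k : Int, 0 ≤ k → k < n →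
      pvR edges k (PySem.List.pyGetD l k 0) ∧ PySem.List.pyGetD l k 0 ≤ k) ∧
    (∀ v : Int, 0 ≤ v → v < n → PySem.List.pyGetD s v 0 = (l.count v : Int))

lemma pv_sum_set (l : List Int) (i : Nat) (x : Int) (h : i < l.length) :
    (l.set i x).sum = l.sum - l[i] + x := by
  have h1 := List.sum_take_add_sum_drop l i
  have h2 : l.drop i = l[i] :: l.drop (i + 1) := (List.getElem_cons_drop h).symm
  rw [h2, List.sum_cons] at h1
  rw [List.sum_set, if_pos h, ← h1]
  ring

-- the size list after Python's `size[o] -= 1; size[w] += 1`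
def pvSZ (s : List Int) (o w : Int) : List Int :=
  PySem.List.pySetD (PySem.List.pySetD s o (PySem.List.pyGetD s o 0 - 1)) w
    (PySem.List.pyGetD (PySem.List.pySetD s o (PySem.List.pyGetD s o 0 - 1)) w 0 + 1)

lemma pvPass_cons (n : Int) (es : List (Int × Int)) (e : Int × Int) (l sz : List Int) (ch : Bool)
    (hb : (0 ≤ e.1 ∧ e.1 < n) ∧ (0 ≤ e.2 ∧ e.2 < n)) :
    pvPass n (e :: es) (l, sz, ch) =
      if PySem.List.pyGetD l e.1 0 < PySem.List.pyGetD l e.2 0 then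
        pvPass n es (PySem.List.pySetD l e.2 (PySem.List.pyGetD l e.1 0),
          pvSZ sz (PySem.List.pyGetD l e.2 0) (PySem.List.pyGetD l e.1 0), true)
      else if PySem.List.pyGetD l e.2 0 < PySem.List.pyGetD l e.1 0 then
        pvPass n es (PySem.List.pySetD l e.1 (PySem.List.pyGetD l e.2 0),
          pvSZ sz (PySem.List.pyGetD l e.1 0) (PySem.List.pyGetD l e.2 0), true)
      else pvPass n es (l, sz, ch) := by
  have hstep : pvPass n (e :: es) (l, sz, ch) = pvPass n es
      (if 0 ≤ e.1 ∧ e.1 < n ∧ 0 ≤ e.2 ∧ e.2 < n then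
        let la := PySem.List.pyGetD l e.1 0
        let lb := PySem.List.pyGetD l e.2 0
        if la < lb then
          (PySem.List.pySetD l e.2 la,
           PySem.List.pySetD (PySem.List.pySetD sz lb (PySem.List.pyGetD sz lb 0 - 1)) la
             (PySem.List.pyGetD (PySem.List.pySetD sz lb (PySem.List.pyGetD sz lb 0 - 1)) la 0 + 1),
           true)
        else if lb < la then
          (PySem.List.pySetD l e.1 lb,
           PySem.List.pySetD (PySem.List.pySetD sz la (PySem.List.pyGetD sz la 0 - 1)) lb
             (PySem.List.pyGetD (PySem.List.pySetD sz la (PySem.List.pyGetD sz la 0 - 1)) lb 0 + 1),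
           true)
        else (l, sz, ch)
      else (l, sz, ch)) := rfl
  rw [hstep, if_pos ⟨hb.1.1, hb.1.2, hb.2.1, hb.2.2⟩]
  rcases lt_trichotomy (PySem.List.pyGetD l e.1 0) (PySem.List.pyGetD l e.2 0) with h | h | h
  · have harg : (let la := PySem.List.pyGetD l e.1 0
        let lb := PySem.List.pyGetD l e.2 0
        if la < lb then
          (PySem.List.pySetD l e.2 la,
           PySem.List.pySetD (PySem.List.pySetD sz lb (PySem.List.pyGetD sz lb 0 - 1)) la
             (PySem.List.pyGetD (PySem.List.pySetD sz lb (PySem.List.pyGetD sz lb 0 - 1)) la 0 + 1),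
           true)
        else if lb < la then
          (PySem.List.pySetD l e.1 lb,
           PySem.List.pySetD (PySem.List.pySetD sz la (PySem.List.pyGetD sz la 0 - 1)) lb
             (PySem.List.pyGetD (PySem.List.pySetD sz la (PySem.List.pyGetD sz la 0 - 1)) lb 0 + 1),
           true)
        else (l, sz, ch)) =
        (PySem.List.pySetD l e.2 (PySem.List.pyGetD l e.1 0),
          pvSZ sz (PySem.List.pyGetD l e.2 0) (PySem.List.pyGetD l e.1 0), true) := by
      rw [if_pos h]
      rfl
    rw [harg, if_pos h]
  · have harg : (let la := PySem.List.pyGetD l e.1 0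
        let lb := PySem.List.pyGetD l e.2 0
        if la < lb then
          (PySem.List.pySetD l e.2 la,
           PySem.List.pySetD (PySem.List.pySetD sz lb (PySem.List.pyGetD sz lb 0 - 1)) la
             (PySem.List.pyGetD (PySem.List.pySetD sz lb (PySem.List.pyGetD sz lb 0 - 1)) la 0 + 1),
           true)
        else if lb < la then
          (PySem.List.pySetD l e.1 lb,
           PySem.List.pySetD (PySem.List.pySetD sz la (PySem.List.pyGetD sz la 0 - 1)) lb
             (PySem.List.pyGetD (PySem.List.pySetD sz la (PySem.List.pyGetD sz la 0 - 1)) lb 0 + 1),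
           true)
        else (l, sz, ch)) = (l, sz, ch) := by
      rw [if_neg (by omega), if_neg (by omega)]
    rw [harg, if_neg (by omega), if_neg (by omega)]
  · have harg : (let la := PySem.List.pyGetD l e.1 0
        let lb := PySem.List.pyGetD l e.2 0
        if la < lb then
          (PySem.List.pySetD l e.2 la,
           PySem.List.pySetD (PySem.List.pySetD sz lb (PySem.List.pyGetD sz lb 0 - 1)) la
             (PySem.List.pyGetD (PySem.List.pySetD sz lb (PySem.List.pyGetD sz lb 0 - 1)) la 0 + 1),
           true)
        else if lb < la then
          (PySem.List.pySetD l e.1 lb,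
           PySem.List.pySetD (PySem.List.pySetD sz la (PySem.List.pyGetD sz la 0 - 1)) lb
             (PySem.List.pyGetD (PySem.List.pySetD sz la (PySem.List.pyGetD sz la 0 - 1)) lb 0 + 1),
           true)
        else (l, sz, ch)) =
        (PySem.List.pySetD l e.1 (PySem.List.pyGetD l e.2 0),
          pvSZ sz (PySem.List.pyGetD l e.1 0) (PySem.List.pyGetD l e.2 0), true) := by
      rw [if_neg (by omega), if_pos h]
      rfl
    rw [harg, if_neg (by omega), if_pos h]

lemma pvSetStep {n : Int} {edges : List (Int × Int)} {l sz : List Int} (hInv : pvLInv n edges l sz)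
    {i w : Int} (hi0 : 0 ≤ i) (hi1 : i < n) (hR : pvR edges i w) (hw0 : 0 ≤ w)
    (hlt : w < PySem.List.pyGetD l i 0) :
    pvLInv n edges (PySem.List.pySetD l i w) (pvSZ sz (PySem.List.pyGetD l i 0) w) ∧
      (PySem.List.pySetD l i w).sum < l.sum := by
  obtain ⟨hlen, hslen, hnn, hk, hs⟩ := hInv
  have hiL : i < (l.length : Int) := by rw [hlen]; omega
  have hold0 : 0 ≤ PySem.List.pyGetD l i 0 := hnn _ (pv_get_mem l i hi0 hiL)
  have holdn : PySem.List.pyGetD l i 0 < n := by have := (hk i hi0 hi1).2; omega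
  have hwo : w ≠ PySem.List.pyGetD l i 0 := by omega
  have hset : PySem.List.pySetD l i w = l.set i.toNat w := PySem.List.pySetD_of_nonneg l w hi0
  have hgetl : PySem.List.pyGetD l i 0 = l[i.toNat]'(by omega) :=
    PySem.List.pyGetD_eq_getElem l 0 hi0 hiL
  have hpos : 0 < l.count (PySem.List.pyGetD l i 0) :=
    List.count_pos_iff.2 (by rw [hgetl]; exact List.getElem_mem _)
  have hcount : ∀ v : Int, ((PySem.List.pySetD l i w).count v : Int) =
      (l.count v : Int) - (if PySem.List.pyGetD l i 0 = v then 1 else 0) + (if w = v then 1 else 0) := by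
    intro v
    rw [hset, List.count_set (by omega)]
    rw [← hgetl]
    have hpos' := hpos
    by_cases h1 : PySem.List.pyGetD l i 0 = v
    · rw [h1] at hpos'
      by_cases h2 : w = v <;> simp [h1, h2] <;> omega
    · by_cases h2 : w = v <;> simp [h1, h2] <;> omega
  have hsLen : sz.length = n.toNat := hslen
  have hs2get : ∀ x : Int, 0 ≤ x →
      PySem.List.pyGetD (PySem.List.pySetD sz (PySem.List.pyGetD l i 0) (PySem.List.pyGetD sz (PySem.List.pyGetD l i 0) 0 - 1)) x 0 =
        if x = PySem.List.pyGetD l i 0 then PySem.List.pyGetD sz (PySem.List.pyGetD l i 0) 0 - 1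
        else PySem.List.pyGetD sz x 0 :=
    fun x hx => pv_get_set sz (PySem.List.pyGetD l i 0) x _ hold0 (by rw [hsLen]; omega) hx
  refine ⟨⟨?_, ?_, ?_, ?_, ?_⟩, ?_⟩
  · rw [hset, List.length_set, hlen]
  · unfold pvSZ
    rw [PySem.List.length_pySetD, PySem.List.length_pySetD, hsLen]
  · intro x hx
    rw [hset] at hx
    rcases List.mem_or_eq_of_mem_set hx with hx | rfl
    · exact hnn x hx
    · exact hw0
  · intro k hk0 hk1
    rw [pv_get_set l i k w hi0 hiL hk0]
    by_cases hki : k = i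
    · subst hki
      rw [if_pos rfl]
      exact ⟨hR, by have := (hk k hk0 hk1).2; omega⟩
    · rw [if_neg hki]
      exact hk k hk0 hk1
  · intro v hv0 hv1
    unfold pvSZ
    rw [pv_get_set _ w v _ hw0 (by rw [PySem.List.length_pySetD, hsLen]; omega) hv0,
      hs2get w hw0, hs2get v hv0, hcount v]
    have hsv := hs v hv0 hv1
    have hsw := hs w hw0 (by omega)
    have hso := hs (PySem.List.pyGetD l i 0) hold0 holdn
    by_cases h1 : v = w
    · rw [if_pos h1, if_neg (show ¬ w = PySem.List.pyGetD l i 0 by omega),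
        if_neg (show ¬ PySem.List.pyGetD l i 0 = v by omega), if_pos h1.symm]
      have hc : l.count v = l.count w := by rw [h1]
      omega
    · by_cases h2 : v = PySem.List.pyGetD l i 0
      · rw [if_neg h1, if_pos h2, if_pos h2.symm, if_neg (show ¬ w = v by omega)]
        have hc : l.count v = l.count (PySem.List.pyGetD l i 0) := by rw [h2]
        omega
      · rw [if_neg h1, if_neg h2, if_neg (fun hh => h2 hh.symm), if_neg (fun hh => h1 hh.symm)]
        omega
  · rw [hset, pv_sum_set l i.toNat w (by omega)]
    omega

lemma pvPass_spec {n : Int} {edges : List (Int × Int)}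
    (hpre : ∀ e ∈ edges, (0 ≤ e.1 ∧ e.1 < n) ∧ (0 ≤ e.2 ∧ e.2 < n)) :
    ∀ (es : List (Int × Int)), (∀ e ∈ es, e ∈ edges) → ∀ (l sz : List Int) (ch : Bool), pvLInv n edges l sz →
      pvLInv n edges (pvPass n es (l, sz, ch)).1 (pvPass n es (l, sz, ch)).2.1 ∧
      (pvPass n es (l, sz, ch)).1.sum ≤ l.sum ∧
      (((pvPass n es (l, sz, ch)).2.2 = ch ∧ (pvPass n es (l, sz, ch)).1 = l ∧
          (pvPass n es (l, sz, ch)).2.1 = sz ∧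
          ∀ e ∈ es, PySem.List.pyGetD l e.1 0 = PySem.List.pyGetD l e.2 0) ∨
        ((pvPass n es (l, sz, ch)).2.2 = true ∧ (pvPass n es (l, sz, ch)).1.sum < l.sum)) := by
  intro es
  induction es with
  | nil =>
    intro _ l sz ch hInv
    exact ⟨hInv, le_refl _, Or.inl ⟨rfl, rfl, rfl, by simp⟩⟩
  | cons e es ih =>
    intro hsub l sz ch hInv
    obtain ⟨a, b⟩ := e
    have he : (a, b) ∈ edges := hsub (a, b) List.mem_cons_self
    have hsub' : ∀ e' ∈ es, e' ∈ edges := fun e' he' => hsub e' (List.mem_cons_of_mem _ he')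
    have hre := hpre (a, b) he
    have hre2 : (0 ≤ a ∧ a < n) ∧ (0 ≤ b ∧ b < n) := hre
    have hlen := hInv.1
    have ha : 0 ≤ a ∧ a < (l.length : Int) := by
      refine ⟨hre2.1.1, ?_⟩; rw [hlen]; have := hre2.1.2; omega
    have hb : 0 ≤ b ∧ b < (l.length : Int) := by
      refine ⟨hre2.2.1, ?_⟩; rw [hlen]; have := hre2.2.2; omega
    have hadj : pvAdj edges a b := Or.inl he
    rw [pvPass_cons n es (a, b) l sz ch hre]
    dsimp only
    split_ifs with hLt1 hLt2
    · -- label[a] < label[b] : set index b to label[a]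
      have hR : pvR edges b (PySem.List.pyGetD l a 0) :=
        (Relation.ReflTransGen.single (pvAdj_symm hadj)).trans
          (hInv.2.2.2.1 a hre2.1.1 hre2.1.2).1
      have hw0 : 0 ≤ PySem.List.pyGetD l a 0 := hInv.2.2.1 _ (pv_get_mem l a ha.1 ha.2)
      obtain ⟨hI2, hsum⟩ := pvSetStep hInv hre2.2.1 hre2.2.2 hR hw0 hLt1
      obtain ⟨hI, hs, hc⟩ := ih hsub' _ _ true hI2
      refine ⟨hI, by omega, Or.inr ?_⟩
      rcases hc with ⟨hc1, hc2, _, _⟩ | ⟨hc1, hc2⟩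
      · exact ⟨hc1, by rw [hc2]; exact hsum⟩
      · exact ⟨hc1, by omega⟩
    · -- label[b] < label[a] : set index a to label[b]
      have hR : pvR edges a (PySem.List.pyGetD l b 0) :=
        (Relation.ReflTransGen.single hadj).trans (hInv.2.2.2.1 b hre2.2.1 hre2.2.2).1
      have hw0 : 0 ≤ PySem.List.pyGetD l b 0 := hInv.2.2.1 _ (pv_get_mem l b hb.1 hb.2)
      obtain ⟨hI2, hsum⟩ := pvSetStep hInv hre2.1.1 hre2.1.2 hR hw0 hLt2
      obtain ⟨hI, hs, hc⟩ := ih hsub' _ _ true hI2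
      refine ⟨hI, by omega, Or.inr ?_⟩
      rcases hc with ⟨hc1, hc2, _, _⟩ | ⟨hc1, hc2⟩
      · exact ⟨hc1, by rw [hc2]; exact hsum⟩
      · exact ⟨hc1, by omega⟩
    · -- equal labels: nothing happens
      have hEq : PySem.List.pyGetD l a 0 = PySem.List.pyGetD l b 0 := by omega
      obtain ⟨hI, hs, hc⟩ := ih hsub' l sz ch hInv
      refine ⟨hI, hs, ?_⟩
      rcases hc with ⟨hc1, hc2, hc3, hc4⟩ | hc
      · refine Or.inl ⟨hc1, hc2, hc3, ?_⟩
        intro e' he'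
        rcases List.mem_cons.1 he' with rfl | h'
        · exact hEq
        · exact hc4 _ h'
      · exact Or.inr hc

lemma pvProp_fix {n : Int} {edges : List (Int × Int)}
    (hpre : ∀ e ∈ edges, (0 ≤ e.1 ∧ e.1 < n) ∧ (0 ≤ e.2 ∧ e.2 < n)) :
    ∀ (fuel : Nat) (l sz : List Int), pvLInv n edges l sz → l.sum.toNat < fuel →
      pvLInv n edges (pvProp n edges fuel l sz).1 (pvProp n edges fuel l sz).2 ∧
      ∀ e ∈ edges, PySem.List.pyGetD (pvProp n edges fuel l sz).1 e.1 0 =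
        PySem.List.pyGetD (pvProp n edges fuel l sz).1 e.2 0 := by
  intro fuel
  induction fuel with
  | zero => intro l sz _ h; omega
  | succ f ih =>
    intro l sz hInv hfuel
    obtain ⟨hI, hs, hc⟩ := pvPass_spec hpre edges (fun _ he => he) l sz false hInv
    have hstep : pvProp n edges (f + 1) l sz =
        if (pvPass n edges (l, sz, false)).2.2 then
          pvProp n edges f (pvPass n edges (l, sz, false)).1 (pvPass n edges (l, sz, false)).2.1
        else ((pvPass n edges (l, sz, false)).1, (pvPass n edges (l, sz, false)).2.1) := rfl
    rcases hc with ⟨h2, hl1, hs1, hfix⟩ | ⟨h2, hsum⟩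
    · rw [hstep, h2]
      simp only [Bool.false_eq_true, if_false]
      rw [hl1, hs1]
      exact ⟨hInv, hfix⟩
    · rw [hstep, h2, if_pos rfl]
      have hnn : 0 ≤ (pvPass n edges (l, sz, false)).1.sum := List.sum_nonneg hI.2.2.1
      exact ih _ _ hI (by omega)

-- label values are constant along reachability once every edge is label-equal
lemma pvFix_const {edges : List (Int × Int)} {lf : List Int}
    (hFix : ∀ e ∈ edges, PySem.List.pyGetD lf e.1 0 = PySem.List.pyGetD lf e.2 0)
    {a b : Int} (h : pvR edges a b) : PySem.List.pyGetD lf a 0 = PySem.List.pyGetD lf b 0 := by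
  induction h with
  | refl => rfl
  | tail _ hadj ih =>
    rcases hadj with h' | h'
    · exact ih.trans (hFix _ h')
    · exact ih.trans (hFix _ h').symm

-- ---------- A side: the graph dictionary ----------

def pvG (edges : List (Int × Int)) : PySem.Dict Int (List Int) :=
  edges.foldl
    (fun (g : PySem.Dict Int (List Int)) e =>
      (g.modify e.1 [] (· ++ [e.2])).modify e.2 [] (· ++ [e.1]))
    PySem.Dict.empty

lemma pvG_mem_aux :
    ∀ (es : List (Int × Int)) (d : PySem.Dict Int (List Int)) (c x : Int),
      x ∈ (es.foldl
          (fun (g : PySem.Dict Int (List Int)) e =>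
            (g.modify e.1 [] (· ++ [e.2])).modify e.2 [] (· ++ [e.1])) d).getD c [] ↔
        x ∈ d.getD c [] ∨ ∃ e ∈ es, (c = e.1 ∧ x = e.2) ∨ (c = e.2 ∧ x = e.1) := by
  intro es
  induction es with
  | nil => simp
  | cons e es ih =>
    intro d c x
    rw [List.foldl_cons, ih]
    by_cases hc2 : c = e.2 <;> by_cases hc1 : c = e.1 <;> by_cases he : e.2 = e.1 <;>
      simp [PySem.Dict.getD_modify, hc1, hc2, he] <;>
      first
        | tauto
        | (exfalso; omega)
        | aesop

lemma pvG_mem (edges : List (Int × Int)) (c x : Int) :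
    x ∈ (pvG edges).getD c [] ↔ pvAdj edges c x := by
  unfold pvG
  rw [pvG_mem_aux]
  simp only [PySem.Dict.getD_empty, List.not_mem_nil, false_or]
  constructor
  · rintro ⟨e, he, ⟨h1, h2⟩ | ⟨h1, h2⟩⟩
    · left; subst h1; subst h2; simpa using he
    · right; subst h1; subst h2; simpa using he
  · rintro (h | h)
    · exact ⟨(c, x), h, Or.inl ⟨rfl, rfl⟩⟩
    · exact ⟨(x, c), h, Or.inr ⟨rfl, rfl⟩⟩

-- ---------- A side: BFS ----------

def pvStep (s : List Int × List Int × Int) (nb : Int) : List Int × List Int × Int :=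
  if PySem.List.pyGetD s.1 nb 0 == 0 then
    (PySem.List.pySetD s.1 nb 1, s.2.1 ++ [nb], s.2.2 + 1)
  else s

def pv01 (v : List Int) : Prop := ∀ x ∈ v, x = 0 ∨ x = 1

lemma pv01_get {v : List Int} (h : pv01 v) {k : Int} (hk : 0 ≤ k) :
    PySem.List.pyGetD v k 0 = 0 ∨ PySem.List.pyGetD v k 0 = 1 := by
  rw [PySem.List.pyGetD_of_nonneg v 0 hk, List.getD_eq_getElem?_getD]
  rcases lt_or_ge k.toNat v.length with h1 | h1
  · rw [List.getElem?_eq_getElem h1]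
    exact h _ (List.getElem_mem h1)
  · rw [List.getElem?_eq_none h1]
    left; rfl

lemma pvFold_spec {n : Int} :
    ∀ (nbrs : List Int), (∀ x ∈ nbrs, 0 ≤ x ∧ x < n) →
    ∀ (v : List Int) (q : List Int) (c : Int), v.length = n.toNat → pv01 v →
    (nbrs.foldl pvStep (v, q, c)).1.length = n.toNat ∧ pv01 (nbrs.foldl pvStep (v, q, c)).1 ∧
    (∀ k : Int, 0 ≤ k →
      (PySem.List.pyGetD (nbrs.foldl pvStep (v, q, c)).1 k 0 = 1 ↔ PySem.List.pyGetD v k 0 = 1 ∨ k ∈ nbrs)) ∧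
    (∀ x ∈ q, x ∈ (nbrs.foldl pvStep (v, q, c)).2.1) ∧
    (∀ x ∈ (nbrs.foldl pvStep (v, q, c)).2.1, x ∈ q ∨ x ∈ nbrs) ∧
    (∀ x ∈ nbrs, x ∈ (nbrs.foldl pvStep (v, q, c)).2.1 ∨ PySem.List.pyGetD v x 0 = 1) ∧
    q.length ≤ (nbrs.foldl pvStep (v, q, c)).2.1.length ∧
    ((nbrs.foldl pvStep (v, q, c)).2.1.length + (nbrs.foldl pvStep (v, q, c)).1.count 0
       = q.length + v.count 0) ∧
    (nbrs.foldl pvStep (v, q, c)).2.2 = c + ((v.count 0 : Int) - ((nbrs.foldl pvStep (v, q, c)).1.count 0 : Int)) := by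
  intro nbrs
  induction nbrs with
  | nil =>
    intro _ v q c hlen h01
    refine ⟨hlen, h01, ?_, ?_, ?_, ?_, ?_, ?_, ?_⟩ <;> simp
  | cons nb nbrs ih =>
    intro hn v q c hlen h01
    have hnb := hn nb List.mem_cons_self
    have hn' : ∀ x ∈ nbrs, 0 ≤ x ∧ x < n := fun x hx => hn x (List.mem_cons_of_mem _ hx)
    by_cases hm : PySem.List.pyGetD v nb 0 = 0
    · -- nb unvisited: mark it, enqueue it
      have hnbL : nb < (v.length : Int) := by rw [hlen]; omega
      have hstep : pvStep (v, q, c) nb = (PySem.List.pySetD v nb 1, q ++ [nb], c + 1) := by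
        unfold pvStep
        rw [if_pos (by simpa using hm)]
      have hset : PySem.List.pySetD v nb 1 = v.set nb.toNat 1 :=
        PySem.List.pySetD_of_nonneg v 1 hnb.1
      have hlen' : (PySem.List.pySetD v nb 1).length = n.toNat := by
        rw [PySem.List.length_pySetD, hlen]
      have h01' : pv01 (PySem.List.pySetD v nb 1) := by
        intro x hx
        rw [hset] at hx
        rcases List.mem_or_eq_of_mem_set hx with hx | rfl
        · exact h01 x hx
        · right; rfl
      have hget' : ∀ k : Int, 0 ≤ k →
          PySem.List.pyGetD (PySem.List.pySetD v nb 1) k 0 = if k = nb then 1 else PySem.List.pyGetD v k 0 :=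
        fun k hk => pv_get_set v nb k 1 hnb.1 hnbL hk
      have hvnb : v[nb.toNat]'(by omega) = 0 := by
        rw [← PySem.List.pyGetD_eq_getElem v 0 hnb.1 hnbL]; exact hm
      have hcnt : (PySem.List.pySetD v nb 1).count 0 + 1 = v.count 0 := by
        rw [hset, List.count_set (by omega)]
        have hpos : 0 < v.count 0 := List.count_pos_iff.2 (by rw [← hvnb]; exact List.getElem_mem _)
        simp [hvnb]
        omega
      rw [List.foldl_cons, hstep]
      obtain ⟨i1, i2, i3, i4, i5, i6, i7, i8, i9⟩ := ih hn' _ (q ++ [nb]) (c + 1) hlen' h01'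
      refine ⟨i1, i2, ?_, ?_, ?_, ?_, ?_, ?_, ?_⟩
      · intro k hk
        rw [i3 k hk, hget' k hk]
        by_cases hknb : k = nb
        · subst hknb
          simp
        · rw [if_neg hknb]
          simp [List.mem_cons, hknb]
      · intro x hx
        exact i4 x (List.mem_append_left _ hx)
      · intro x hx
        rcases i5 x hx with hx' | hx'
        · rcases List.mem_append.1 hx' with h' | h'
          · exact Or.inl h'
          · right; simp at h'; simp [h']
        · right; exact List.mem_cons_of_mem _ hx'
      · intro x hx
        rcases List.mem_cons.1 hx with rfl | hx'
        · exact Or.inl (i4 x (List.mem_append_right _ (List.mem_singleton_self _)))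
        · rcases i6 x hx' with h' | h'
          · exact Or.inl h'
          · rw [hget' x (hn' x hx').1] at h'
            by_cases hxnb : x = nb
            · exact Or.inl (i4 x (by rw [hxnb]; exact List.mem_append_right _ (List.mem_singleton_self _)))
            · rw [if_neg hxnb] at h'
              exact Or.inr h'
      · have := i7
        simp only [List.length_append, List.length_singleton] at this
        omega
      · have := i8
        simp only [List.length_append, List.length_singleton] at this
        omega
      · rw [i9]
        have h8 := i8
        omega
    · -- nb already visited: no change
      have hstep : pvStep (v, q, c) nb = (v, q, c) := by
        unfold pvStep
        rw [if_neg (by simpa using hm)]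
      have hv1 : PySem.List.pyGetD v nb 0 = 1 := by
        rcases pv01_get h01 hnb.1 with h' | h'
        · exact absurd h' hm
        · exact h'
      rw [List.foldl_cons, hstep]
      obtain ⟨i1, i2, i3, i4, i5, i6, i7, i8, i9⟩ := ih hn' v q c hlen h01
      refine ⟨i1, i2, ?_, i4, ?_, ?_, i7, i8, i9⟩
      · intro k hk
        rw [i3 k hk]
        by_cases hknb : k = nb
        · subst hknb
          simp [hv1]
        · simp [List.mem_cons, hknb]
      · intro x hx
        rcases i5 x hx with h' | h'
        · exact Or.inl h'
        · exact Or.inr (List.mem_cons_of_mem _ h')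
      · intro x hx
        rcases List.mem_cons.1 hx with rfl | hx'
        · exact Or.inr hv1
        · exact i6 x hx'

-- a closed marked set absorbs everything reachable from a marked node
lemma pvClosed_reach {n : Int} {edges : List (Int × Int)} (hpre : ∀ e ∈ edges, (0 ≤ e.1 ∧ e.1 < n) ∧ (0 ≤ e.2 ∧ e.2 < n))
    {v : List Int}
    (hcl : ∀ k : Int, 0 ≤ k → PySem.List.pyGetD v k 0 = 1 → ∀ j, pvAdj edges k j → PySem.List.pyGetD v j 0 = 1)
    {x k : Int} (h : pvR edges x k) (hx : 0 ≤ x ∧ x < n) (hm : PySem.List.pyGetD v x 0 = 1) :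
    PySem.List.pyGetD v k 0 = 1 := by
  induction h with
  | refl => exact hm
  | @tail b c hR hadj ih => exact hcl b (pvR_range hpre hR hx).1 ih c hadj

lemma pvBfs_spec {n : Int} {edges : List (Int × Int)} (hpre : ∀ e ∈ edges, (0 ≤ e.1 ∧ e.1 < n) ∧ (0 ≤ e.2 ∧ e.2 < n)) :
    ∀ (fuel : Nat) (v q : List Int) (c : Int),
      v.length = n.toNat → pv01 v →
      (∀ x ∈ q, (0 ≤ x ∧ x < n) ∧ PySem.List.pyGetD v x 0 = 1) →
      (∀ k : Int, 0 ≤ k → PySem.List.pyGetD v k 0 = 1 → k ∉ q →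
        ∀ j, pvAdj edges k j → PySem.List.pyGetD v j 0 = 1) →
      2 * v.count 0 + q.length ≤ fuel →
      (pvBfs (pvG edges) fuel v q c).1.length = n.toNat ∧ pv01 (pvBfs (pvG edges) fuel v q c).1 ∧
      (∀ k : Int, 0 ≤ k →
        (PySem.List.pyGetD (pvBfs (pvG edges) fuel v q c).1 k 0 = 1 ↔
          PySem.List.pyGetD v k 0 = 1 ∨ ∃ x ∈ q, pvR edges x k)) ∧
      (pvBfs (pvG edges) fuel v q c).2 = c + ((v.count 0 : Int) - ((pvBfs (pvG edges) fuel v q c).1.count 0 : Int)) ∧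
      (∀ k : Int, 0 ≤ k → PySem.List.pyGetD (pvBfs (pvG edges) fuel v q c).1 k 0 = 1 →
        ∀ j, pvAdj edges k j → PySem.List.pyGetD (pvBfs (pvG edges) fuel v q c).1 j 0 = 1) := by
  intro fuel
  induction fuel with
  | zero =>
    intro v q c hlen h01 hq hfr hfuel
    cases q with
    | nil =>
      have hnil : pvBfs (pvG edges) 0 v [] c = (v, c) := rfl
      rw [hnil]
      refine ⟨hlen, h01, ?_, by simp, ?_⟩
      · intro k hk; simp
      · intro k hk h1 j hadj
        exact hfr k hk h1 (List.not_mem_nil) j hadj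
    | cons cur rest =>
      exfalso
      simp only [List.length_cons] at hfuel
      omega
  | succ f ih =>
    intro v q c hlen h01 hq hfr hfuel
    cases q with
    | nil =>
      have hnil : pvBfs (pvG edges) (f + 1) v [] c = (v, c) := rfl
      rw [hnil]
      refine ⟨hlen, h01, ?_, by simp, ?_⟩
      · intro k hk; simp
      · intro k hk h1 j hadj
        exact hfr k hk h1 (List.not_mem_nil) j hadj
    | cons cur rest =>
      have hunf : pvBfs (pvG edges) (f + 1) v (cur :: rest) c =
          pvBfs (pvG edges) f (((pvG edges).getD cur []).foldl pvStep (v, rest, c)).1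
            (((pvG edges).getD cur []).foldl pvStep (v, rest, c)).2.1
            (((pvG edges).getD cur []).foldl pvStep (v, rest, c)).2.2 := rfl
      have hcur := hq cur List.mem_cons_self
      have hnrange : ∀ x ∈ (pvG edges).getD cur [], 0 ≤ x ∧ x < n :=
        fun x hx => (pvAdj_range hpre ((pvG_mem edges cur x).1 hx)).2
      obtain ⟨f1, f2, f3, f4, f5, f6, f7, f8, f9⟩ :=
        pvFold_spec (n := n) ((pvG edges).getD cur []) hnrange v rest c hlen h01
      set F := ((pvG edges).getD cur []).foldl pvStep (v, rest, c) with hF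
      -- preconditions of the recursive call
      have hq2 : ∀ x ∈ F.2.1, (0 ≤ x ∧ x < n) ∧ PySem.List.pyGetD F.1 x 0 = 1 := by
        intro x hx
        have hr : 0 ≤ x ∧ x < n := by
          rcases f5 x hx with h' | h'
          · exact (hq x (List.mem_cons_of_mem _ h')).1
          · exact hnrange x h'
        refine ⟨hr, (f3 x hr.1).2 ?_⟩
        rcases f5 x hx with h' | h'
        · exact Or.inl (hq x (List.mem_cons_of_mem _ h')).2
        · exact Or.inr h'
      have hfr2 : ∀ k : Int, 0 ≤ k → PySem.List.pyGetD F.1 k 0 = 1 → k ∉ F.2.1 →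
          ∀ j, pvAdj edges k j → PySem.List.pyGetD F.1 j 0 = 1 := by
        intro k hk hk1 hknq j hadj
        have hjr := (pvAdj_range hpre hadj).2
        have hvk : PySem.List.pyGetD v k 0 = 1 := by
          rcases (f3 k hk).1 hk1 with h' | h'
          · exact h'
          · rcases f6 k h' with h'' | h''
            · exact absurd h'' hknq
            · exact h''
        by_cases hkcur : k = cur
        · subst hkcur
          exact (f3 j hjr.1).2 (Or.inr ((pvG_mem edges k j).2 hadj))
        · have hknr : k ∉ rest := fun h' => hknq (f4 k h')
          have hknqq : k ∉ cur :: rest := by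
            intro h'
            rcases List.mem_cons.1 h' with h'' | h''
            · exact hkcur h''
            · exact hknr h''
          exact (f3 j hjr.1).2 (Or.inl (hfr k hk hvk hknqq j hadj))
      have hfuel2 : 2 * F.1.count 0 + F.2.1.length ≤ f := by
        simp only [List.length_cons] at hfuel
        omega
      obtain ⟨b1, b2, b3, b4, b5⟩ := ih F.1 F.2.1 F.2.2 f1 f2 hq2 hfr2 hfuel2
      rw [hunf]
      refine ⟨b1, b2, ?_, ?_, b5⟩
      · intro k hk
        rw [b3 k hk]
        constructor
        · rintro (h' | ⟨x, hx, hRx⟩)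
          · rcases (f3 k hk).1 h' with h'' | h''
            · exact Or.inl h''
            · exact Or.inr ⟨cur, List.mem_cons_self,
                Relation.ReflTransGen.single ((pvG_mem edges cur k).1 h'')⟩
          · rcases f5 x hx with h'' | h''
            · exact Or.inr ⟨x, List.mem_cons_of_mem _ h'', hRx⟩
            · exact Or.inr ⟨cur, List.mem_cons_self,
                (Relation.ReflTransGen.single ((pvG_mem edges cur x).1 h'')).trans hRx⟩
        · rintro (h' | ⟨x, hx, hRx⟩)
          · exact Or.inl ((f3 k hk).2 (Or.inl h'))
          · rcases List.mem_cons.1 hx with rfl | hx'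
            · -- x = cur : use closedness of the final marked set
              have hBcur : PySem.List.pyGetD (pvBfs (pvG edges) f F.1 F.2.1 F.2.2).1 x 0 = 1 :=
                (b3 x hcur.1.1).2 (Or.inl ((f3 x hcur.1.1).2 (Or.inl hcur.2)))
              have := pvClosed_reach hpre b5 hRx hcur.1 hBcur
              rw [b3 k hk] at this
              exact this
            · exact Or.inr ⟨x, f4 x hx', hRx⟩
      · rw [b4, f9]
        omega

-- ---------- A side: the outer `for i in range(n):` loop ----------

def pvStepA (graph : PySem.Dict Int (List Int)) (n : Int) (s : List Int × Int) (i : Int) : List Int × Int :=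
  if PySem.List.pyGetD s.1 i 0 == 0 then
    let visited := PySem.List.pySetD s.1 i 1
    let r := pvBfs graph (2 * n.toNat + 1) visited [i] 1
    (r.1, s.2 + r.2 * (n - r.2))
  else s

lemma pvCalcA_eq (n : Int) (edges : List (Int × Int)) :
    calcUnreachableNodes n edges =
      PySem.Int.floordiv
        ((PySem.List.pyRange 0 n 1).foldl (pvStepA (pvG edges) n) (List.replicate n.toNat 0, 0)).2 2 := rfl

lemma pvOuter {n : Int} {edges : List (Int × Int)} (hpre : ∀ e ∈ edges, (0 ≤ e.1 ∧ e.1 < n) ∧ (0 ≤ e.2 ∧ e.2 < n))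
    {lf : List Int} (hlen : lf.length = n.toNat) (hnn : ∀ x ∈ lf, 0 ≤ x)
    (hInvR : ∀ k : Int, 0 ≤ k → k < n →
      pvR edges k (PySem.List.pyGetD lf k 0) ∧ PySem.List.pyGetD lf k 0 ≤ k)
    (hFix : ∀ e ∈ edges, PySem.List.pyGetD lf e.1 0 = PySem.List.pyGetD lf e.2 0) :
    ∀ (m : Nat), (m : Int) ≤ n →
      (PySem.List.pyRange 0 (m : Int) 1).foldl (pvStepA (pvG edges) n) (List.replicate n.toNat 0, 0) =
        ((PySem.List.pyRange 0 n 1).map (fun k => if PySem.List.pyGetD lf k 0 < (m : Int) then 1 else 0),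
         ((PySem.List.pyRange 0 (m : Int) 1).filter (fun j => PySem.List.pyGetD lf j 0 == j)).foldl
           (fun acc j => acc + (lf.count j : Int) * (n - (lf.count j : Int))) 0) := by
  intro m
  induction m with
  | zero =>
    intro _
    rw [show ((0 : Nat) : Int) = 0 from rfl, PySem.List.pyRange_one_eq_nil (le_refl (0 : Int))]
    simp only [List.foldl_nil, List.filter_nil]
    have hmap : (PySem.List.pyRange 0 n 1).map (fun k => if PySem.List.pyGetD lf k 0 < (0 : Int) then (1 : Int) else 0)
        = (PySem.List.pyRange 0 n 1).map (fun _ => (0 : Int)) := by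
      apply List.map_congr_left
      intro k hk
      have hk' := PySem.List.mem_pyRange_one.1 hk
      have hkL : k < (lf.length : Int) := by rw [hlen]; omega
      have h0 : 0 ≤ PySem.List.pyGetD lf k 0 := hnn _ (pv_get_mem lf k hk'.1 hkL)
      rw [if_neg (by omega)]
    rw [hmap, List.map_const', PySem.List.length_pyRange_one]
    norm_num
  | succ m ihm =>
    intro hm1
    have hmn : (m : Int) < n := by push_cast at hm1; omega
    have hm : (m : Int) ≤ n := le_of_lt hmn
    have hm0 : (0 : Int) ≤ (m : Int) := by positivity
    have hcast : ((m + 1 : Nat) : Int) = (m : Int) + 1 := by push_cast; ring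
    rw [hcast, PySem.List.pyRange_one_succ_right hm0, List.foldl_append, ihm hm,
      List.filter_append, List.foldl_cons, List.foldl_nil]
    have hLR := hInvR m hm0 hmn
    have hcond : PySem.List.pyGetD
        ((PySem.List.pyRange 0 n 1).map (fun k => if PySem.List.pyGetD lf k 0 < (m : Int) then (1 : Int) else 0))
        (m : Int) 0 = if PySem.List.pyGetD lf (m : Int) 0 < (m : Int) then 1 else 0 := by
      rw [pv_get_map_ind n _ (m : Int) hm0]
      by_cases h' : PySem.List.pyGetD lf (m : Int) 0 < (m : Int)
      · rw [if_pos ⟨hmn, h'⟩, if_pos h']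
      · rw [if_neg (by tauto), if_neg h']
    have hVlen : ((PySem.List.pyRange 0 n 1).map
        (fun k => if PySem.List.pyGetD lf k 0 < (m : Int) then (1 : Int) else 0)).length = n.toNat := by
      rw [List.length_map, PySem.List.length_pyRange_one]; omega
    by_cases hfix : PySem.List.pyGetD lf (m : Int) 0 < (m : Int)
    · -- skip branch: i = m is already visited (its component representative is smaller)
      have hstepA : pvStepA (pvG edges) n
          ((PySem.List.pyRange 0 n 1).map (fun k => if PySem.List.pyGetD lf k 0 < (m : Int) then (1 : Int) else 0),
           ((PySem.List.pyRange 0 (m : Int) 1).filter (fun j => PySem.List.pyGetD lf j 0 == j)).foldl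
             (fun acc j => acc + (lf.count j : Int) * (n - (lf.count j : Int))) 0) (m : Int) =
          ((PySem.List.pyRange 0 n 1).map (fun k => if PySem.List.pyGetD lf k 0 < (m : Int) then (1 : Int) else 0),
           ((PySem.List.pyRange 0 (m : Int) 1).filter (fun j => PySem.List.pyGetD lf j 0 == j)).foldl
             (fun acc j => acc + (lf.count j : Int) * (n - (lf.count j : Int))) 0) := by
        unfold pvStepA
        rw [if_neg]
        dsimp only
        rw [hcond, if_pos hfix]
        decide
      rw [hstepA]
      have hnom : ∀ k : Int, 0 ≤ k → k < n → PySem.List.pyGetD lf k 0 ≠ (m : Int) := by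
        intro k hk0 hk1 hEq
        have h1 : PySem.List.pyGetD lf k 0 = PySem.List.pyGetD lf (PySem.List.pyGetD lf k 0) 0 :=
          pvFix_const hFix (hInvR k hk0 hk1).1
        rw [hEq] at h1
        omega
      have hmapeq : (PySem.List.pyRange 0 n 1).map
          (fun k => if PySem.List.pyGetD lf k 0 < (m : Int) then (1 : Int) else 0) =
          (PySem.List.pyRange 0 n 1).map
          (fun k => if PySem.List.pyGetD lf k 0 < (m : Int) + 1 then (1 : Int) else 0) := by
        apply List.map_congr_left
        intro k hk
        have hk' := PySem.List.mem_pyRange_one.1 hk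
        have := hnom k hk'.1 hk'.2
        by_cases h' : PySem.List.pyGetD lf k 0 < (m : Int)
        · rw [if_pos h', if_pos (by omega)]
        · rw [if_neg h', if_neg (by omega)]
      have hfilt : ([((m : Nat) : Int)].filter (fun j => PySem.List.pyGetD lf j 0 == j)) = [] := by
        have hb : (PySem.List.pyGetD lf ((m : Nat) : Int) 0 == ((m : Nat) : Int)) = false := by
          simp only [beq_eq_false_iff_ne, ne_eq]
          omega
        rw [List.filter_singleton, hb, Bool.cond_false]
      rw [hfilt, List.append_nil, hmapeq]
    · -- start a BFS at i = m (m is its component's least node)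
      have hfixm : PySem.List.pyGetD lf (m : Int) 0 = (m : Int) := by omega
      have hstepA : pvStepA (pvG edges) n
          ((PySem.List.pyRange 0 n 1).map (fun k => if PySem.List.pyGetD lf k 0 < (m : Int) then (1 : Int) else 0),
           ((PySem.List.pyRange 0 (m : Int) 1).filter (fun j => PySem.List.pyGetD lf j 0 == j)).foldl
             (fun acc j => acc + (lf.count j : Int) * (n - (lf.count j : Int))) 0) (m : Int) =
          ((pvBfs (pvG edges) (2 * n.toNat + 1)
              (PySem.List.pySetD ((PySem.List.pyRange 0 n 1).map
                (fun k => if PySem.List.pyGetD lf k 0 < (m : Int) then (1 : Int) else 0)) (m : Int) 1)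
              [(m : Int)] 1).1,
           ((PySem.List.pyRange 0 (m : Int) 1).filter (fun j => PySem.List.pyGetD lf j 0 == j)).foldl
             (fun acc j => acc + (lf.count j : Int) * (n - (lf.count j : Int))) 0 +
             (pvBfs (pvG edges) (2 * n.toNat + 1)
              (PySem.List.pySetD ((PySem.List.pyRange 0 n 1).map
                (fun k => if PySem.List.pyGetD lf k 0 < (m : Int) then (1 : Int) else 0)) (m : Int) 1)
              [(m : Int)] 1).2 *
             (n - (pvBfs (pvG edges) (2 * n.toNat + 1)
              (PySem.List.pySetD ((PySem.List.pyRange 0 n 1).map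
                (fun k => if PySem.List.pyGetD lf k 0 < (m : Int) then (1 : Int) else 0)) (m : Int) 1)
              [(m : Int)] 1).2)) := by
        unfold pvStepA
        rw [if_pos]
        dsimp only
        rw [hcond, if_neg hfix]
        decide
      rw [hstepA]
      set V := (PySem.List.pyRange 0 n 1).map
        (fun k => if PySem.List.pyGetD lf k 0 < (m : Int) then (1 : Int) else 0) with hV
      set V' := PySem.List.pySetD V (m : Int) 1 with hV'
      have hVget : ∀ k : Int, 0 ≤ k →
          PySem.List.pyGetD V k 0 = if k < n ∧ PySem.List.pyGetD lf k 0 < (m : Int) then 1 else 0 :=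
        fun k hk => pv_get_map_ind n _ k hk
      have hmV : (m : Int) < (V.length : Int) := by rw [hVlen]; omega
      have hV'get : ∀ k : Int, 0 ≤ k →
          PySem.List.pyGetD V' k 0 = if k = (m : Int) then 1 else PySem.List.pyGetD V k 0 :=
        fun k hk => pv_get_set V (m : Int) k 1 hm0 hmV hk
      have hV'len : V'.length = n.toNat := by rw [hV', PySem.List.length_pySetD, hVlen]
      have hV'01 : pv01 V' := by
        intro x hx
        rw [hV', PySem.List.pySetD_of_nonneg V 1 hm0] at hx
        rcases List.mem_or_eq_of_mem_set hx with hx | rfl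
        · rcases List.mem_map.1 hx with ⟨j, _, rfl⟩
          by_cases h' : PySem.List.pyGetD lf j 0 < (m : Int) <;> simp [h']
        · right; rfl
      have hq : ∀ x ∈ [(m : Int)], (0 ≤ x ∧ x < n) ∧ PySem.List.pyGetD V' x 0 = 1 := by
        intro x hx
        rcases List.mem_singleton.1 hx with rfl
        exact ⟨⟨hm0, hmn⟩, by rw [hV'get ((m : Nat) : Int) hm0, if_pos rfl]⟩
      have hfr : ∀ k : Int, 0 ≤ k → PySem.List.pyGetD V' k 0 = 1 → k ∉ [(m : Int)] →
          ∀ j, pvAdj edges k j → PySem.List.pyGetD V' j 0 = 1 := by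
        intro k hk hk1 hknq j hadj
        have hkm : k ≠ (m : Int) := fun h' => hknq (by rw [h']; exact List.mem_singleton_self _)
        rw [hV'get k hk, if_neg hkm, hVget k hk] at hk1
        have hkc : k < n ∧ PySem.List.pyGetD lf k 0 < (m : Int) := by
          by_contra h'
          rw [if_neg h'] at hk1
          omega
        have hjr := (pvAdj_range hpre hadj).2
        have hLj : PySem.List.pyGetD lf j 0 = PySem.List.pyGetD lf k 0 :=
          (pvFix_const hFix (Relation.ReflTransGen.single hadj)).symm
        have hjm : j ≠ (m : Int) := by
          intro h'
          rw [h', hfixm] at hLj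
          omega
        rw [hV'get j hjr.1, if_neg hjm, hVget j hjr.1, if_pos ⟨hjr.2, by omega⟩]
      have hfuel : 2 * V'.count 0 + ([(m : Int)]).length ≤ 2 * n.toNat + 1 := by
        have := List.count_le_length (a := (0 : Int)) (l := V')
        rw [hV'len] at this
        simp only [List.length_singleton]
        omega
      obtain ⟨b1, b2, b3, b4, b5⟩ := pvBfs_spec hpre (2 * n.toNat + 1) V' [(m : Int)] 1
        hV'len hV'01 hq hfr hfuel
      set r := pvBfs (pvG edges) (2 * n.toNat + 1) V' [(m : Int)] 1 with hr
      -- first component: the new visited list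
      have hr1 : r.1 = (PySem.List.pyRange 0 n 1).map
          (fun k => if PySem.List.pyGetD lf k 0 < (m : Int) + 1 then (1 : Int) else 0) := by
        apply pv_eq_map_range n r.1 _ b1
        intro k hk0 hk1
        have hiff := b3 k hk0
        by_cases hLk : PySem.List.pyGetD lf k 0 < (m : Int) + 1
        · rw [if_pos hLk]
          apply hiff.2
          by_cases hLk' : PySem.List.pyGetD lf k 0 < (m : Int)
          · left
            rw [hV'get k hk0]
            by_cases hkm : k = (m : Int)
            · rw [if_pos hkm]
            · rw [if_neg hkm, hVget k hk0, if_pos ⟨hk1, hLk'⟩]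
          · -- pyGetD lf k 0 = m : k is in m's component
            have hLkm : PySem.List.pyGetD lf k 0 = (m : Int) := by omega
            refine Or.inr ⟨(m : Int), List.mem_singleton_self _, ?_⟩
            exact pvR_symm (hLkm ▸ (hInvR k hk0 hk1).1)
        · rw [if_neg hLk]
          rcases pv01_get b2 hk0 with h0 | h1
          · exact h0
          · exfalso
            rcases hiff.1 h1 with hv' | ⟨x, hx, hRx⟩
            · rw [hV'get k hk0] at hv'
              by_cases hkm : k = (m : Int)
              · rw [hkm, hfixm] at hLk; omega
              · rw [if_neg hkm, hVget k hk0] at hv'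
                by_cases h' : k < n ∧ PySem.List.pyGetD lf k 0 < (m : Int)
                · omega
                · rw [if_neg h'] at hv'; omega
            · rcases List.mem_singleton.1 hx with rfl
              have := pvFix_const hFix hRx
              rw [hfixm] at this
              omega
      -- second component: the count added equals the multiplicity of label m
      have hcV : V.count 0 = (PySem.List.pyRange 0 n 1).countP
          (fun k => decide ¬ (PySem.List.pyGetD lf k 0 < (m : Int))) := by
        rw [hV, pv_count0_map_if]
      have hcR : r.1.count 0 = (PySem.List.pyRange 0 n 1).countP
          (fun k => decide ¬ (PySem.List.pyGetD lf k 0 < (m : Int) + 1)) := by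
        rw [hr1, pv_count0_map_if]
      have hVm0 : V[(m : Nat)]'(by omega) = 0 := by
        have h0 := hVget ((m : Nat) : Int) hm0
        rw [PySem.List.pyGetD_eq_getElem V 0 hm0 hmV, if_neg (by omega)] at h0
        simpa using h0
      have hcV' : V'.count 0 + 1 = V.count 0 := by
        rw [hV', PySem.List.pySetD_of_nonneg V 1 hm0]
        simp only [Int.toNat_natCast]
        rw [List.count_set (by omega)]
        have hpos : 0 < V.count 0 := List.count_pos_iff.2 (by rw [← hVm0]; exact List.getElem_mem _)
        simp [hVm0]
        omega
      have hsplit := pv_countP_split (PySem.List.pyRange 0 n 1) (fun k => PySem.List.pyGetD lf k 0) (m : Int)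
      have hlfmap : lf = (PySem.List.pyRange 0 n 1).map (fun k => PySem.List.pyGetD lf k 0) :=
        pv_eq_map_range n lf _ hlen (fun _ _ _ => rfl)
      have hcount : lf.count (m : Int) = (PySem.List.pyRange 0 n 1).countP
          (fun k => decide (PySem.List.pyGetD lf k 0 = (m : Int))) := by
        conv_lhs => rw [List.count_eq_countP, hlfmap, List.countP_map]
        apply List.countP_congr
        intro a _
        simp [Function.comp]
      have hcnt : r.2 = (lf.count (m : Int) : Int) := by
        rw [b4]
        omega
      rw [hr1, hcnt]
      have hfiltm : ([((m : Nat) : Int)].filter (fun j => PySem.List.pyGetD lf j 0 == j)) = [(m : Int)] := by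
        have hb : (PySem.List.pyGetD lf ((m : Nat) : Int) 0 == ((m : Nat) : Int)) = true := by
          simp [hfixm]
        rw [List.filter_singleton, hb, Bool.cond_true]
      rw [hfiltm, List.foldl_append, List.foldl_cons, List.foldl_nil]

lemma pv_sum_range_le : ∀ (N : Nat), (PySem.List.pyRange 0 (N : Int) 1).sum ≤ (N : Int) * N := by
  intro N
  induction N with
  | zero => simp [PySem.List.pyRange_one_eq_nil (le_refl (0 : Int))]
  | succ N ih =>
    have h : ((N + 1 : Nat) : Int) = (N : Int) + 1 := by push_cast; ring
    rw [h, PySem.List.pyRange_one_succ_right (by positivity), List.sum_append]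
    simp only [List.sum_cons, List.sum_nil, add_zero]
    nlinarith [ih]

-- ===== VERDICT (by name: the statement is the Claim_ definition above) =====
theorem calcUnreachableNodes_spec : Claim_equal_calcUnreachableNodes := by
  intro n edges _ hpre
  unfold Spec_calcUnreachableNodes
  by_cases hn : n ≤ 0
  · -- n ≤ 0 : A's loop body never runs; B's guard skips every edge; both return 0
    have hskip : ∀ (es : List (Int × Int)) (l sz : List Int) (ch : Bool),
        pvPass n es (l, sz, ch) = (l, sz, ch) := by
      intro es
      induction es with
      | nil => intro l sz ch; rfl
      | cons e es ih =>
        intro l sz ch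
        have hstep : pvPass n (e :: es) (l, sz, ch) = pvPass n es
            (if 0 ≤ e.1 ∧ e.1 < n ∧ 0 ≤ e.2 ∧ e.2 < n then
              let la := PySem.List.pyGetD l e.1 0
              let lb := PySem.List.pyGetD l e.2 0
              if la < lb then
                (PySem.List.pySetD l e.2 la,
                 PySem.List.pySetD (PySem.List.pySetD sz lb (PySem.List.pyGetD sz lb 0 - 1)) la
                   (PySem.List.pyGetD (PySem.List.pySetD sz lb (PySem.List.pyGetD sz lb 0 - 1)) la 0 + 1),
                 true)
              else if lb < la then
                (PySem.List.pySetD l e.1 lb,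
                 PySem.List.pySetD (PySem.List.pySetD sz la (PySem.List.pyGetD sz la 0 - 1)) lb
                   (PySem.List.pyGetD (PySem.List.pySetD sz la (PySem.List.pyGetD sz la 0 - 1)) lb 0 + 1),
                 true)
              else (l, sz, ch)
            else (l, sz, ch)) := rfl
        rw [hstep, if_neg (by omega)]
        exact ih l sz ch
    have hr : PySem.List.pyRange 0 n 1 = [] := PySem.List.pyRange_one_eq_nil hn
    have hN0 : n.toNat = 0 := by omega
    have hA : calcUnreachableNodes n edges = PySem.Int.floordiv 0 2 := by
      rw [pvCalcA_eq n edges, hr]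
      rfl
    have hB : calcUnreachableNodes_alt n edges = PySem.Int.floordiv 0 2 := by
      show PySem.Int.floordiv
          (((PySem.List.pyRange 0 n 1).zip
            (((pvProp n edges (n.toNat * n.toNat + 1) (PySem.List.pyRange 0 n 1) (List.replicate n.toNat 1)).1.zip
              (pvProp n edges (n.toNat * n.toNat + 1) (PySem.List.pyRange 0 n 1) (List.replicate n.toNat 1)).2))).foldl
            (fun r p => if p.2.1 == p.1 then r + p.2.2 * (n - p.2.2) else r) 0) 2 = _
      have hprop : pvProp n edges (n.toNat * n.toNat + 1) (PySem.List.pyRange 0 n 1) (List.replicate n.toNat 1)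
          = (PySem.List.pyRange 0 n 1, List.replicate n.toNat 1) := by
        rw [hN0]
        show (if (pvPass n edges (PySem.List.pyRange 0 n 1, List.replicate 0 1, false)).2.2 then
            pvProp n edges 0 _ _
          else ((pvPass n edges (PySem.List.pyRange 0 n 1, List.replicate 0 1, false)).1,
            (pvPass n edges (PySem.List.pyRange 0 n 1, List.replicate 0 1, false)).2.1)) = _
        rw [hskip]
        rfl
      rw [hprop, hr, hN0]
      rfl
    rw [hA, hB]
  · -- main path : n > 0, every edge endpoint in range(n)
    have hb : ∀ e ∈ edges, (0 ≤ e.1 ∧ e.1 < n) ∧ (0 ≤ e.2 ∧ e.2 < n) := by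
      rcases hpre with h | h
      · exact absurd h hn
      · exact h
    have hnN : ((n.toNat : Nat) : Int) = n := Int.toNat_of_nonneg (by omega)
    have hInit : pvLInv n edges (PySem.List.pyRange 0 n 1) (List.replicate n.toNat 1) := by
      refine ⟨by rw [PySem.List.length_pyRange_one]; omega, List.length_replicate, ?_, ?_, ?_⟩
      · intro x hx
        exact (PySem.List.mem_pyRange_one.1 hx).1
      · intro k hk0 hk1
        rw [pv_get_range hk0 hk1]
        exact ⟨Relation.ReflTransGen.refl, le_refl _⟩
      · intro v hv0 hv1
        have h1 : PySem.List.pyGetD (List.replicate n.toNat (1 : Int)) v 0 = 1 := by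
          rw [PySem.List.pyGetD_of_nonneg _ 0 hv0, List.getD_eq_getElem?_getD,
            List.getElem?_replicate, if_pos (by omega)]
          rfl
        have h2 : (PySem.List.pyRange 0 n 1).count v = 1 :=
          List.count_eq_one_of_mem (PySem.List.nodup_pyRange_one 0 n)
            (PySem.List.mem_pyRange_one.2 ⟨hv0, hv1⟩)
        rw [h1, h2]
        rfl
    have hsum0 : (PySem.List.pyRange 0 n 1).sum.toNat < n.toNat * n.toNat + 1 := by
      have h1 := pv_sum_range_le n.toNat
      rw [hnN] at h1
      have h2 : 0 ≤ (PySem.List.pyRange 0 n 1).sum := List.sum_nonneg hInit.2.2.1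
      have h3 : ((n.toNat * n.toNat : Nat) : Int) = n * n := by push_cast [hnN]; ring
      omega
    obtain ⟨⟨hlen, hslen, hnn, hInvR, hSInv⟩, hFixlf⟩ :=
      pvProp_fix hb (n.toNat * n.toNat + 1) _ _ hInit hsum0
    set lf := (pvProp n edges (n.toNat * n.toNat + 1) (PySem.List.pyRange 0 n 1) (List.replicate n.toNat 1)).1 with hlf
    set sz := (pvProp n edges (n.toNat * n.toNat + 1) (PySem.List.pyRange 0 n 1) (List.replicate n.toNat 1)).2 with hsz
    have houter := pvOuter hb hlen hnn hInvR hFixlf n.toNat (by omega)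
    rw [hnN] at houter
    -- B's final pass over enumerate(zip(label, size)) equals A's per-representative sum
    have hlfmap : lf = (PySem.List.pyRange 0 n 1).map (fun k => PySem.List.pyGetD lf k 0) :=
      pv_eq_map_range n lf _ hlen (fun _ _ _ => rfl)
    have hszmap : sz = (PySem.List.pyRange 0 n 1).map (fun v => (lf.count v : Int)) :=
      pv_eq_map_range n sz _ hslen hSInv
    have hzip : lf.zip sz = (PySem.List.pyRange 0 n 1).map
        (fun k => (PySem.List.pyGetD lf k 0, (lf.count k : Int))) := by
      conv_lhs => rw [hlfmap, hszmap]
      exact List.zip_map'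
    have hen : (PySem.List.pyRange 0 n 1).zip (lf.zip sz) = (PySem.List.pyRange 0 n 1).map
        (fun j => (j, PySem.List.pyGetD lf j 0, (lf.count j : Int))) := by
      conv_lhs => rw [← List.map_id (PySem.List.pyRange 0 n 1), hzip]
      rw [List.zip_map']
      simp [id]
    have hB : calcUnreachableNodes_alt n edges = PySem.Int.floordiv
        (((PySem.List.pyRange 0 n 1).filter (fun j => PySem.List.pyGetD lf j 0 == j)).foldl
          (fun acc j => acc + (lf.count j : Int) * (n - (lf.count j : Int))) 0) 2 := by
      show PySem.Int.floordiv
          (((PySem.List.pyRange 0 n 1).zip (lf.zip sz)).foldl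
            (fun r p => if p.2.1 == p.1 then r + p.2.2 * (n - p.2.2) else r) 0) 2 = _
      rw [hen, List.foldl_map, List.foldl_filter]
    rw [pvCalcA_eq n edges, houter, hB]
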